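-- pv_equiv track=rewrite | github.com/jimbarrett27/wrdcld | wrdcld/rectangle.py | _find_gaps_for_img_row
-- ===== SOURCE A (Python) =====
-- def _find_gaps_for_img_row(
--     img_row: list[int], base_value: int, image_width: int
-- ) -> tuple[list[int], list[int]]:
--     """
--     Finds the gaps in a row of an image.
--
--     Args:
--         img_row (list[int]): The row of the image.
--         base_value (int): The base value to compare against (the image background).
--         image_width (int): The width of the image.
--
--     Returns:
--         tuple[list[int], list[int]]: Tuple containing two lists. The first list contains the indices of the left edges of the gaps, and the second list contains the indices of the right edges of the gaps.
--     """
--     left_inds = []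
--     right_inds = []
--
--     # find the gaps between the letters
--     left_inds = []
--     right_inds = []
--     new_rect_active = False
--     for col_ind, val in enumerate(img_row):
--         if val == base_value and not new_rect_active:
--             new_rect_active = True
--             left_inds.append(col_ind)
--         elif new_rect_active and val != base_value:
--             new_rect_active = False
--             right_inds.append(col_ind)
--         else:
--             continue
--
--     if new_rect_active:
--         right_inds.append(image_width)
--
--     return left_inds, right_inds
-- ===== SOURCE B (Python) =====
-- def _find_gaps_for_img_row(img_row, base_value, image_width):
--     left_inds = []
--     right_inds = []
--     n = len(img_row)
--     i = 0
--     while i < n: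
--         # scan the maximal run of equal values starting at i
--         j = i
--         while j < n and img_row[j] == img_row[i]:
--             j += 1
--         if img_row[i] == base_value:
--             left_inds.append(i)
--             right_inds.append(image_width if j == n else j)
--         i = j
--     return left_inds, right_inds
-- ===== Notes on version B (the rewrite author's own statement) =====
-- stated objective: alternative
-- what changed: B scans the row as maximal runs of equal values with a two-pointer loop (like itertools.groupby), emitting one (left,right) pair per background run, instead of A's element-by-element scan with a new_rect_active state flag.
import Mathlib
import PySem

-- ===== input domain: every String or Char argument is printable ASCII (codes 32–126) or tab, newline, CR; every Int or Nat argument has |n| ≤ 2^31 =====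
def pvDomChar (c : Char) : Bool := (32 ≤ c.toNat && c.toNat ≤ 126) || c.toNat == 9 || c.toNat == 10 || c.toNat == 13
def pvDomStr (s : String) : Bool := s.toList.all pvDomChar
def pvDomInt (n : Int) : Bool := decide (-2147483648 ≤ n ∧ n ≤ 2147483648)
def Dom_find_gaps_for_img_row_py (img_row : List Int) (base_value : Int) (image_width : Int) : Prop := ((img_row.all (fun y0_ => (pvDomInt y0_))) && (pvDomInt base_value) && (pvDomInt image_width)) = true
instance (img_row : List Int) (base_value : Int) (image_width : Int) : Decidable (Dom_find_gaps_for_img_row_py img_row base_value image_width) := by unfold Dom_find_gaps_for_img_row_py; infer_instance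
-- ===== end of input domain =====

-- B replaces A's element-by-element scan with a state flag by a run-based two-pointer scan
-- (groupby-style): an alternative decomposition of the same O(n) task; return values proved equal.


-- ===== PORT A =====
-- A's for-loop over enumerate(img_row) with the new_rect_active flag, as structural recursion
-- over the same state (current column, flag); results are produced in append order.
def aLoop (base_value : Int) : List Int → Nat → Bool → List Int × List Int × Bool
  | [], _, active => ([], [], active)
  | v :: rest, col, active =>
    if v = base_value ∧ ¬ active then
      let r := aLoop base_value rest (col + 1) true
      ((col : Int) :: r.1, r.2.1, r.2.2)
    else if active ∧ v ≠ base_value then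
      let r := aLoop base_value rest (col + 1) false
      (r.1, (col : Int) :: r.2.1, r.2.2)
    else
      aLoop base_value rest (col + 1) active

def find_gaps_for_img_row_py (img_row : List Int) (base_value : Int) (image_width : Int) : List Int × List Int :=
  let r := aLoop base_value img_row 0 false
  (r.1, r.2.1 ++ (if r.2.2 then [image_width] else []))

-- ===== PORT B =====
-- B's outer while-loop over maximal runs: the inner `while j < n and img_row[j] == img_row[i]`
-- scan is takeWhile/dropWhile on the suffix; i advances by the run length.
def bRun (base_value image_width : Int) (n : Nat) : List Int → Nat → List Int × List Int
  | [], _ => ([], [])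
  | x :: xs, i =>
    let k := (xs.takeWhile (· == x)).length + 1
    let r := bRun base_value image_width n (xs.dropWhile (· == x)) (i + k)
    if x = base_value then
      ((i : Int) :: r.1, (if i + k = n then image_width else ((i + k : Nat) : Int)) :: r.2)
    else r
  termination_by xs => xs.length
  decreasing_by simpa using Nat.lt_succ_of_le (List.length_dropWhile_le _ _)

def find_gaps_for_img_row_py_alt (img_row : List Int) (base_value : Int) (image_width : Int) : List Int × List Int :=
  bRun base_value image_width img_row.length img_row 0

-- ===== PRECONDITION & SPEC =====
def Spec_find_gaps_for_img_row_py (img_row : List Int) (base_value : Int) (image_width : Int) (out : List Int × List Int) : Prop := out = find_gaps_for_img_row_py_alt img_row base_value image_width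
instance (img_row : List Int) (base_value : Int) (image_width : Int) (out : List Int × List Int) : Decidable (Spec_find_gaps_for_img_row_py img_row base_value image_width out) := by unfold Spec_find_gaps_for_img_row_py; infer_instance

-- ===== CLAIM (what is proved, stated in full; the proofs are below) =====
def Claim_equal_find_gaps_for_img_row_py : Prop := ∀ (img_row : List Int) (base_value : Int) (image_width : Int), Dom_find_gaps_for_img_row_py img_row base_value image_width → Spec_find_gaps_for_img_row_py img_row base_value image_width (find_gaps_for_img_row_py img_row base_value image_width)

-- ===== LEMMAS AND PROOFS =====

-- consuming a uniform run while A's flag stays constant: all-base elements under active=true,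
-- and all-non-base elements under active=false, are both A's `continue` branch
theorem aLoop_skip_true {base_value : Int} (ys : List Int) (h : ∀ y ∈ ys, y = base_value) :
    ∀ rest col, aLoop base_value (ys ++ rest) col true = aLoop base_value rest (col + ys.length) true := by
  induction ys with
  | nil => intro rest col; simp
  | cons y ys ih =>
    intro rest col
    have hy : y = base_value := h y (by simp)
    have hys : ∀ y ∈ ys, y = base_value := fun z hz => h z (by simp [hz])
    simp only [List.cons_append, aLoop, hy]
    rw [if_neg (by simp), if_neg (by simp), ih hys]
    congr 1
    simp [List.length_cons]; omega

theorem aLoop_skip_false {base_value : Int} (ys : List Int) (h : ∀ y ∈ ys, y ≠ base_value) :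
    ∀ rest col, aLoop base_value (ys ++ rest) col false = aLoop base_value rest (col + ys.length) false := by
  induction ys with
  | nil => intro rest col; simp
  | cons y ys ih =>
    intro rest col
    have hy : y ≠ base_value := h y (by simp)
    have hys : ∀ y ∈ ys, y ≠ base_value := fun z hz => h z (by simp [hz])
    simp only [List.cons_append, aLoop]
    rw [if_neg (by tauto), if_neg (by tauto), ih hys]
    congr 1
    simp [List.length_cons]; omega

-- the first element surviving dropWhile falsifies the predicate
theorem head_dropWhile_false (p : Int → Bool) : ∀ (l : List Int) (z : Int) (zs : List Int),
    l.dropWhile p = z :: zs → p z = false := by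
  intro l
  induction l with
  | nil => intro z zs h; simp [List.dropWhile] at h
  | cons a l ih =>
    intro z zs h
    by_cases ha : p a
    · exact ih z zs (by simpa [List.dropWhile, ha] using h)
    · rw [List.dropWhile_cons_of_neg (by simpa using ha)] at h
      cases h; simpa using ha

-- A's post-processed result (loop + the final `if new_rect_active` append)
def aPost (base_value image_width : Int) (xs : List Int) (col : Nat) : List Int × List Int :=
  let r := aLoop base_value xs col false
  (r.1, r.2.1 ++ (if r.2.2 then [image_width] else []))

theorem main_lemma (base_value image_width : Int) :
    ∀ m (xs : List Int), xs.length ≤ m → ∀ col,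
      aPost base_value image_width xs col =
        bRun base_value image_width (col + xs.length) xs col := by
  intro m
  induction m with
  | zero =>
    intro xs hm col
    have hxs : xs = [] := List.eq_nil_of_length_eq_zero (Nat.le_zero.mp hm)
    subst hxs
    simp [aPost, aLoop, bRun]
  | succ m ih =>
    intro xs hm col
    match xs with
    | [] => simp [aPost, aLoop, bRun]
    | x :: xs' =>
      have hm' : xs'.length ≤ m := by
        simp [List.length_cons] at hm; omega
      rw [bRun]
      generalize htw : List.takeWhile (fun y => y == x) xs' = tw
      generalize hdw : List.dropWhile (fun y => y == x) xs' = dw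
      have hsplit : tw ++ dw = xs' := by
        rw [← htw, ← hdw]; exact List.takeWhile_append_dropWhile
      have htw_all : ∀ y ∈ tw, y = x := by
        intro y hy
        rw [← htw] at hy
        simpa using List.mem_takeWhile_imp hy
      have hlen : xs'.length = tw.length + dw.length := by
        rw [← hsplit]; simp
      by_cases hx : x = base_value
      · subst hx
        have h1 : aLoop x (x :: xs') col false =
            ((col : Int) :: (aLoop x dw (col + 1 + tw.length) true).1,
             (aLoop x dw (col + 1 + tw.length) true).2.1,
             (aLoop x dw (col + 1 + tw.length) true).2.2) := by
          conv_lhs => rw [show (x :: xs' : List Int) = x :: (tw ++ dw) by rw [hsplit]]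
          simp only [aLoop]
          rw [if_pos (by simp)]
          rw [aLoop_skip_true tw htw_all]
        rw [if_pos rfl]
        cases dw with
        | nil =>
          have hlen' : xs'.length = tw.length := by simp at hlen; omega
          simp only [aPost]
          rw [h1]
          simp [aLoop, bRun, hlen']
        | cons z zs =>
          have hz : z ≠ x := by
            have := head_dropWhile_false (fun y => y == x) xs' z zs hdw
            simpa using this
          simp only [List.length_cons] at hlen
          have hc : col + 1 + tw.length = col + (tw.length + 1) := by omega
          rw [hc] at h1
          have h2 : aLoop x (z :: zs) (col + (tw.length + 1)) true =
              ((aLoop x zs (col + (tw.length + 1) + 1) false).1,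
               ((col + (tw.length + 1) : Nat) : Int) :: (aLoop x zs (col + (tw.length + 1) + 1) false).2.1,
               (aLoop x zs (col + (tw.length + 1) + 1) false).2.2) := by
            simp only [aLoop]
            rw [if_neg (by tauto), if_pos (by simp [hz])]
          have h3 : aLoop x (z :: zs) (col + (tw.length + 1)) false =
              aLoop x zs (col + (tw.length + 1) + 1) false := by
            simp only [aLoop]
            rw [if_neg (by simp [hz]), if_neg (by simp)]
          have hIH := ih (z :: zs) (by simp only [List.length_cons]; omega)
            (col + (tw.length + 1))
          simp only [aPost, h3] at hIH
          have hnn : col + (tw.length + 1) + (z :: zs).length = col + (x :: xs').length := by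
            simp only [List.length_cons]; omega
          rw [hnn] at hIH
          have e1 := congrArg Prod.fst hIH
          have e2 := congrArg Prod.snd hIH
          simp only [] at e1 e2
          have hne : ¬ (col + (tw.length + 1) = col + (x :: xs').length) := by
            simp only [List.length_cons]; omega
          rw [if_neg hne]
          simp only [aPost, h1, h2]
          simp only [Prod.mk.injEq, List.cons_append]
          exact ⟨by rw [e1], by rw [← e2]⟩
      · have hne_run : ∀ y ∈ x :: tw, y ≠ base_value := by
          intro y hy
          rcases List.mem_cons.mp hy with h | h
          · rw [h]; exact hx
          · rw [htw_all y h]; exact hx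
        have h1 : aLoop base_value (x :: xs') col false =
            aLoop base_value dw (col + (tw.length + 1)) false := by
          conv_lhs => rw [show (x :: xs' : List Int) = (x :: tw) ++ dw by simp [hsplit]]
          rw [aLoop_skip_false _ hne_run]
          congr 1
        rw [if_neg hx]
        have hIH := ih dw (by omega) (col + (tw.length + 1))
        simp only [aPost] at hIH
        simp only [aPost, h1]
        rw [hIH]
        congr 1
        simp only [List.length_cons]
        omega

-- ===== VERDICT (by name: the statement is the Claim_ definition above) =====
theorem find_gaps_for_img_row_py_spec : Claim_equal_find_gaps_for_img_row_py := by
  intro img_row base_value image_width _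
  show _ = _
  have := main_lemma base_value image_width img_row.length img_row le_rfl 0
  simpa [aPost, find_gaps_for_img_row_py, find_gaps_for_img_row_py_alt] using this
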